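-- pv_equiv track=rewrite | github.com/oezilot/Auswertung-Adventskalender | parser.py | set_comma_interval
-- ===== SOURCE A (Python) =====
-- def set_comma_interval(parse_pattern):
--     intervals = [] # array mit allen intervallen der klammern drin!
--     parse_pattern_index = -1
--     klammer = False
--     klammer_index = -1
--     for trace in parse_pattern:
--         parse_pattern_index = parse_pattern_index + 1
--         if trace == 8:
--             if klammer: # ende des intervals
--                 intervals[klammer_index]["ende"] = parse_pattern_index
--                 klammer = False
--             else: # start des intervals
--                 klammer_index = klammer_index + 1
--                 intervals.append({"start": parse_pattern_index})  # Füge ein neues Intervall hinzu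
--                 klammer = True
--     return intervals
-- ===== SOURCE B (Python) =====
-- def set_comma_interval(parse_pattern):
--     # collect-then-pair: gather all positions of marker 8, then pair them up two at a time
--     positions = [i for i, t in enumerate(parse_pattern) if t == 8]
--     intervals = []
--     rest = positions
--     while rest:
--         if len(rest) >= 2:
--             intervals.append({"start": rest[0], "ende": rest[1]})
--             rest = rest[2:]
--         else:
--             intervals.append({"start": rest[0]})
--             rest = []
--     return intervals
-- ===== Notes on version B (the rewrite author's own statement) =====
-- stated objective: alternative
-- what changed: Replaces A's boolean open/close flag state machine (appending and then mutating the last interval in place) with a two-phase approach: one pass collecting the indices of all 8-markers, then a second pass pairing those indices two at a time into interval dicts.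
import Mathlib
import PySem

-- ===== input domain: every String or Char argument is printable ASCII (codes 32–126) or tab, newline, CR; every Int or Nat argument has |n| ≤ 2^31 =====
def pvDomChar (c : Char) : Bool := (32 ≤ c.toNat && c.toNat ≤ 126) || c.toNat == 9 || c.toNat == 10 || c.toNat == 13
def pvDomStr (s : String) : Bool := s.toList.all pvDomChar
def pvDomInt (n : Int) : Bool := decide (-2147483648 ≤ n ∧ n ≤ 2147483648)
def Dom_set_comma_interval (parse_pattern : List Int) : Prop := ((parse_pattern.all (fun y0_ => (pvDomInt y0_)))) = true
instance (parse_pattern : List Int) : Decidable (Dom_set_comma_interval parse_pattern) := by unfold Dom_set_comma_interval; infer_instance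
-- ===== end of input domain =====

-- B replaces A's open/close flag state machine by collect-all-8-positions then pair-two-at-a-time (alternative decomposition, same cost).

-- ===== PORT A =====
-- dict assignment d["ende"] = v (overwrite in place, new key appends)
def pvDictSet (d : List (String × Int)) (k : String) (v : Int) : List (String × Int) :=
  if d.any (fun p => p.1 == k) then d.map (fun p => if p.1 == k then (k, v) else p) else d ++ [(k, v)]

-- the for-loop of A, state = (parse_pattern_index, klammer, klammer_index, intervals);
-- klammer_index is in range whenever klammer is true, so .toNat indexing is exact there
def pvALoop : List Int → Int → Bool → Int → List (List (String × Int)) → List (List (String × Int))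
  | [], _, _, _, intervals => intervals
  | trace :: rest, idx, klammer, kidx, intervals =>
    let idx' := idx + 1
    if trace = 8 then
      if klammer then
        pvALoop rest idx' false kidx
          (intervals.set kidx.toNat (pvDictSet (intervals.getD kidx.toNat []) "ende" idx'))
      else
        pvALoop rest idx' true (kidx + 1) (intervals ++ [[("start", idx')]])
    else
      pvALoop rest idx' klammer kidx intervals

def set_comma_interval (parse_pattern : List Int) : List (List (String × Int)) :=
  pvALoop parse_pattern (-1) false (-1) []

-- ===== PORT B =====
-- while-loop pairing the collected positions two at a time
def pvPairUp : List Int → List (List (String × Int))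
  | [] => []
  | a :: b :: rest => [("start", a), ("ende", b)] :: pvPairUp rest
  | [a] => [[("start", a)]]

def set_comma_interval_alt (parse_pattern : List Int) : List (List (String × Int)) :=
  let positions := (PySem.List.enumerate parse_pattern).filterMap
    (fun p => if p.2 = 8 then some p.1 else none)
  pvPairUp positions

-- ===== PRECONDITION & SPEC =====
def Spec_set_comma_interval (parse_pattern : List Int) (out : List (List (String × Int))) : Prop := out = set_comma_interval_alt parse_pattern
instance (parse_pattern : List Int) (out : List (List (String × Int))) : Decidable (Spec_set_comma_interval parse_pattern out) := by unfold Spec_set_comma_interval; infer_instance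

-- ===== CLAIM (what is proved, stated in full; the proofs are below) =====
def Claim_equal_set_comma_interval : Prop := ∀ (parse_pattern : List Int), Dom_set_comma_interval parse_pattern → Spec_set_comma_interval parse_pattern (set_comma_interval parse_pattern)

-- ===== LEMMAS AND PROOFS =====

-- positions of 8s in l, first element carrying index j
def pvPosFrom : List Int → Int → List Int
  | [], _ => []
  | t :: r, j => if t = 8 then j :: pvPosFrom r (j + 1) else pvPosFrom r (j + 1)

lemma pvDictSet_start (s v : Int) :
    pvDictSet [("start", s)] "ende" v = [("start", s), ("ende", v)] := by
  simp [pvDictSet]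

lemma pvSet_last {α : Type} (acc : List α) (d d' : α) :
    (acc ++ [d]).set acc.length d' = acc ++ [d'] := by
  induction acc with
  | nil => rfl
  | cons a t ih => simp [ih]

lemma pvGetD_last (acc : List (List (String × Int))) (d : List (String × Int)) :
    (acc ++ [d]).getD acc.length [] = d := by
  induction acc with
  | nil => rfl
  | cons a t ih => simpa using ih

lemma pvALoop_key : ∀ (l : List Int) (i : Int) (acc : List (List (String × Int))),
    (pvALoop l i false ((acc.length : Int) - 1) acc = acc ++ pvPairUp (pvPosFrom l (i + 1))) ∧
    (∀ s : Int, pvALoop l i true (acc.length : Int) (acc ++ [[("start", s)]])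
        = acc ++ pvPairUp (s :: pvPosFrom l (i + 1))) := by
  intro l
  induction l with
  | nil => intro i acc; exact ⟨by simp [pvALoop, pvPairUp, pvPosFrom], fun s => by
      simp [pvALoop, pvPairUp, pvPosFrom]⟩
  | cons t r ih =>
    intro i acc
    constructor
    · by_cases h : t = 8
      · have := (ih (i + 1) acc).2 (i + 1)
        simp only [pvALoop, h, pvPosFrom]
        simp [show (acc.length : Int) - 1 + 1 = (acc.length : Int) by ring]; exact this
      · have := (ih (i + 1) acc).1
        simp only [pvALoop, h, if_false, pvPosFrom]
        simpa using this
    · intro s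
      by_cases h : t = 8
      · have h1 : ((acc.length : Int)).toNat = acc.length := by simp
        have := (ih (i + 1) (acc ++ [[("start", s), ("ende", i + 1)]])).1
        simp only [pvALoop, h, pvPosFrom, h1, pvGetD_last, pvDictSet_start,
          pvSet_last]
        rw [show ((acc ++ [[("start", s), ("ende", i + 1)]]).length : Int) - 1
              = (acc.length : Int) by simp] at this
        rw [this, List.append_assoc]
        rfl
      · have := (ih (i + 1) (acc)).2 s
        have h2 : ((acc ++ [[("start", s)]]).length : Int) - 1 + 1
            = ((acc.length : Int)) + 1 := by simp
        simp only [pvALoop, h, if_false, pvPosFrom]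
        simpa using this

lemma pvPositions_eq : ∀ (l : List Int) (j : Int),
    (PySem.List.enumerate l j).filterMap (fun p => if p.2 = 8 then some p.1 else none)
      = pvPosFrom l j := by
  intro l
  induction l with
  | nil => intro j; simp [pvPosFrom]
  | cons t r ih =>
    intro j
    by_cases h : t = 8 <;>
      simp [PySem.List.enumerate_cons, pvPosFrom, h, ih]

-- ===== VERDICT (by name: the statement is the Claim_ definition above) =====
theorem set_comma_interval_spec : Claim_equal_set_comma_interval := by
  intro l _
  show set_comma_interval l = set_comma_interval_alt l
  have h := (pvALoop_key l (-1) []).1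
  simp only [set_comma_interval, set_comma_interval_alt]
  rw [pvPositions_eq]
  simpa using h
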